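-- pv_equiv track=rewrite | github.com/jiwonss/coding-test-practice | 백준/Silver/3986. 좋은 단어/좋은 단어.py | check
-- ===== SOURCE A (Python) =====
-- def check(word):
--     stack = []
--     for w in word:
--         if stack:
--             if stack[-1] == w:
--                 stack.pop()
--             else:
--                 stack.append(w)
--         else:
--             stack.append(w)
--     return 0 if stack else 1
-- ===== SOURCE B (Python) =====
-- def check(word):
--     s = word
--     while True:
--         # one full scan: drop adjacent equal pairs
--         out = []
--         i = 0
--         n = len(s)
--         while i < n:
--             if i + 1 < n and s[i] == s[i + 1]:
--                 i += 2
--             else: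
--                 out.append(s[i])
--                 i += 1
--         t = ''.join(out)
--         if t == s:
--             break
--         s = t
--     return 1 if s == '' else 0
-- ===== Notes on version B (the rewrite author's own statement) =====
-- stated objective: alternative
-- what changed: Replaces the one-pass stack matcher with an iterated rewrite: repeatedly scan the string deleting adjacent equal pairs until a pass changes nothing, then test emptiness (pair cancellation has a unique normal form).
import Mathlib
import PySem

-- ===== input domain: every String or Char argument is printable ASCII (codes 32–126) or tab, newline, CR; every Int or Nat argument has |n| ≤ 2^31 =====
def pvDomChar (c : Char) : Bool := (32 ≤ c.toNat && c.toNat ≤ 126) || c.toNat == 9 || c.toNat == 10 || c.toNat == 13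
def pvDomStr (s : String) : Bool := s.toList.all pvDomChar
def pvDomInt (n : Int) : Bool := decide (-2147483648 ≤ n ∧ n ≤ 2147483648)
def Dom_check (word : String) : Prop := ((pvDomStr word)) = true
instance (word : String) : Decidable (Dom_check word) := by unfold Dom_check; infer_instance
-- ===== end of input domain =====

-- B replaces A's single stack pass by an iterated full-scan rewrite that deletes
-- adjacent equal pairs until a fixpoint, then tests emptiness ("alternative").

-- ===== PORT A =====
-- A's stack, with the TOP at the HEAD of the list (Python keeps the top at the end).
def checkLoop : List Char → List Char → List Char
  | stack, [] => stack
  | stack, w :: ws =>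
    match stack with
    | [] => checkLoop [w] ws
    | t :: rest => if t = w then checkLoop rest ws else checkLoop (w :: t :: rest) ws

def check (word : String) : Int :=
  if checkLoop [] word.toList ≠ [] then 0 else 1

-- ===== PORT B =====
-- one full scan of Source B's inner while-loop: drop adjacent equal pairs, keep the rest
def onePass : List Char → List Char
  | [] => []
  | [a] => [a]
  | a :: b :: t => if a = b then onePass t else a :: onePass (b :: t)

theorem onePass_length_le : ∀ w : List Char, (onePass w).length ≤ w.length := by
  intro w
  induction w using onePass.induct with
  | case1 => simp [onePass]
  | case2 => simp [onePass]
  | case3 b t ih => simp [onePass]; omega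
  | case4 a b t h ih =>
    have ih' : (onePass (b :: t)).length ≤ t.length + 1 := by simpa using ih
    simp [onePass, h]; omega

theorem onePass_lt : ∀ w : List Char, onePass w ≠ w → (onePass w).length < w.length := by
  intro w
  induction w using onePass.induct with
  | case1 => simp [onePass]
  | case2 => simp [onePass]
  | case3 b t ih =>
    intro _
    have := onePass_length_le t
    simp [onePass]; omega
  | case4 a b t h ih =>
    intro hne
    have : onePass (b :: t) ≠ b :: t := by
      intro he; apply hne; simp [onePass, h, he]
    have ih' : (onePass (b :: t)).length < t.length + 1 := by simpa using ih this
    simp [onePass, h]; omega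

-- Source B's outer while-loop: iterate onePass until it changes nothing
def reduceWord (w : List Char) : List Char :=
  if onePass w = w then w else reduceWord (onePass w)
termination_by w.length
decreasing_by exact onePass_lt _ (by assumption)

def check_alt (word : String) : Int :=
  if reduceWord word.toList = [] then 1 else 0

-- ===== PRECONDITION & SPEC =====
def Spec_check (word : String) (out : Int) : Prop := out = check_alt word
instance (word : String) (out : Int) : Decidable (Spec_check word out) := by unfold Spec_check; infer_instance

-- ===== CLAIM (what is proved, stated in full; the proofs are below) =====
def Claim_equal_check : Prop := ∀ (word : String), Dom_check word → Spec_check word (check word)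

-- ===== LEMMAS AND PROOFS =====

-- a fixpoint of onePass has no two adjacent equal characters
theorem chain_of_fix : ∀ w : List Char, onePass w = w → w.IsChain (· ≠ ·) := by
  intro w
  induction w using onePass.induct with
  | case1 => intro _; simp
  | case2 => intro _; simp
  | case3 b t ih =>
    intro he
    exfalso
    have h1 := onePass_length_le t
    have h2 : (onePass (b :: b :: t)).length = t.length + 2 := by rw [he]; simp
    simp [onePass] at h2
    omega
  | case4 a b t h ih =>
    intro he
    simp [onePass, h] at he
    exact List.isChain_cons_cons.mpr ⟨h, ih he⟩

-- on a word with no adjacent equal pair and a stack whose top differs from the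
-- first character, the stack loop just pushes everything
theorem checkLoop_push :
    ∀ (w s : List Char), w.IsChain (· ≠ ·) →
      (∀ a ∈ w.head?, ∀ b ∈ s.head?, a ≠ b) →
      checkLoop s w = w.reverse ++ s := by
  intro w
  induction w with
  | nil => intro s _ _; simp [checkLoop]
  | cons a t ih =>
    intro s hc hh
    have hat : ∀ x ∈ t.head?, ∀ b ∈ (a :: s).head?, x ≠ b := by
      intro x hx b hb
      simp at hb; subst hb
      cases t with
      | nil => simp at hx
      | cons y u =>
        simp at hx; subst hx
        have := (List.isChain_cons_cons.mp hc).1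
        exact fun he => this he.symm
    have hct : t.IsChain (· ≠ ·) := hc.tail
    cases s with
    | nil =>
      simp [checkLoop, ih [a] hct hat]
    | cons b r =>
      have hab : b ≠ a := fun he => hh a (by simp) b (by simp) he.symm
      simp only [checkLoop, if_neg hab]
      rw [ih (a :: b :: r) hct hat]
      simp

-- a stack built by checkLoop never holds two equal adjacent elements; under that
-- invariant, two adjacent equal input characters cancel regardless of the stack
theorem checkLoop_cancel :
    ∀ (s : List Char), s.IsChain (· ≠ ·) → ∀ (a : Char) (t : List Char),
      checkLoop s (a :: a :: t) = checkLoop s t := by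
  intro s hs a t
  cases s with
  | nil => simp [checkLoop]
  | cons x r =>
    by_cases hxa : x = a
    · subst hxa
      simp only [checkLoop]
      cases r with
      | nil => simp
      | cons y u =>
        have hxy : x ≠ y := (List.isChain_cons_cons.mp hs).1
        have hyx : ¬ y = x := fun he => hxy he.symm
        simp [hyx]
    · simp [checkLoop, hxa]

theorem step_chain :
    ∀ (s : List Char), s.IsChain (· ≠ ·) → ∀ (a : Char),
      (checkLoop s [a]).IsChain (· ≠ ·) := by
  intro s hs a
  cases s with
  | nil => simp [checkLoop]
  | cons x r =>
    by_cases hxa : x = a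
    · simpa [checkLoop, hxa] using hs.tail
    · simpa [checkLoop, hxa] using List.isChain_cons_cons.mpr ⟨fun he => hxa he.symm, hs⟩

theorem checkLoop_cons :
    ∀ (s : List Char) (a : Char) (t : List Char),
      checkLoop s (a :: t) = checkLoop (checkLoop s [a]) t := by
  intro s a t
  cases s with
  | nil => simp [checkLoop]
  | cons x r => by_cases hxa : x = a <;> simp [checkLoop, hxa]

-- one rewriting pass does not change the stack-machine result
theorem checkLoop_onePass :
    ∀ (w s : List Char), s.IsChain (· ≠ ·) →
      checkLoop s (onePass w) = checkLoop s w := by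
  intro w
  induction w using onePass.induct with
  | case1 => intro s _; rfl
  | case2 => intro s _; rfl
  | case3 b t ih =>
    intro s hs
    rw [show onePass (b :: b :: t) = onePass t by simp [onePass]]
    rw [ih s hs, checkLoop_cancel s hs b t]
  | case4 a b t h ih =>
    intro s hs
    rw [show onePass (a :: b :: t) = a :: onePass (b :: t) by simp [onePass, h]]
    rw [checkLoop_cons s a (onePass (b :: t)), checkLoop_cons s a (b :: t)]
    exact ih _ (step_chain s hs a)

theorem reduceWord_fix : ∀ w : List Char, onePass (reduceWord w) = reduceWord w := by
  intro w
  induction w using reduceWord.induct with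
  | case1 w h => rw [reduceWord, if_pos h]; exact h
  | case2 w h ih => rw [reduceWord, if_neg h]; exact ih

theorem checkLoop_reduceWord :
    ∀ w : List Char, checkLoop [] (reduceWord w) = checkLoop [] w := by
  intro w
  induction w using reduceWord.induct with
  | case1 w h => rw [reduceWord, if_pos h]
  | case2 w h ih =>
    rw [reduceWord, if_neg h]
    rw [ih, checkLoop_onePass w [] (by simp)]

theorem checkLoop_eq_reverse_reduce :
    ∀ w : List Char, checkLoop [] w = (reduceWord w).reverse := by
  intro w
  rw [← checkLoop_reduceWord w]
  rw [checkLoop_push (reduceWord w) [] (chain_of_fix _ (reduceWord_fix w)) (by simp)]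
  simp

-- ===== VERDICT (by name: the statement is the Claim_ definition above) =====
theorem check_spec : Claim_equal_check := by
  intro word _
  unfold Spec_check check check_alt
  rw [checkLoop_eq_reverse_reduce]
  rcases h : reduceWord word.toList with _ | ⟨a, t⟩ <;> simp
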